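-- pv_equiv track=rewrite | github.com/jlmeredith/ytdatahub | src/ui/data_collection/channel_refresh/comparison.py | _categorize_change
-- ===== SOURCE A (Python) =====
-- def _categorize_change(field, magnitude, old_value, new_value):
--     """Categorize a change based on field type and magnitude."""
--     try:
--         field_lower = field.lower()
--
--         # Critical fields that should always be closely monitored
--         critical_fields = ['subscribers', 'views', 'videos', 'title', 'channel_name']
--         if any(critical_field in field_lower for critical_field in critical_fields):
--             if magnitude in ["Major Change", "Infinite"]:
--                 return "Critical"
--             elif magnitude in ["Moderate Change"]:
--                 return "Important"
--             else:
--                 return "Minor"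
--
--         # Important fields for content analysis
--         important_fields = ['description', 'keywords', 'tags', 'category']
--         if any(important_field in field_lower for important_field in important_fields):
--             if magnitude in ["Major Change", "Infinite"]:
--                 return "Important"
--             else:
--                 return "Minor"
--
--         # Default categorization based on magnitude
--         if magnitude in ["Major Change", "Infinite"]:
--             return "Important"
--         else:
--             return "Minor"
--
--     except Exception:
--         return "Minor"
-- ===== SOURCE B (Python) =====
-- def _categorize_change(field, magnitude, old_value, new_value):
--     """Categorize a change: map (critical-field?, magnitude level) to a severity score
--     and index a label table. The important-field scan of the original is provably
--     redundant (its branch returns the same as the default), so it disappears."""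
--     try:
--         f = field.lower()
--     except Exception:
--         return "Minor"
--     t = 1 if any(k in f for k in ("subscribers", "views", "videos", "title", "channel_name")) else 0
--     m = {"Major Change": 2, "Infinite": 2, "Moderate Change": 1}.get(magnitude, 0)
--     return ("Minor", "Minor", "Important", "Critical")[t + m]
-- ===== Notes on version B (the rewrite author's own statement) =====
-- stated objective: simpler
-- what changed: Replaces the three-tier keyword if/elif chains by an arithmetic severity score (critical-field flag plus a magnitude level from a dict) indexed into a 4-entry label table; the important-field scan is dropped entirely because its branch is identical to the default.
import Mathlib
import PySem

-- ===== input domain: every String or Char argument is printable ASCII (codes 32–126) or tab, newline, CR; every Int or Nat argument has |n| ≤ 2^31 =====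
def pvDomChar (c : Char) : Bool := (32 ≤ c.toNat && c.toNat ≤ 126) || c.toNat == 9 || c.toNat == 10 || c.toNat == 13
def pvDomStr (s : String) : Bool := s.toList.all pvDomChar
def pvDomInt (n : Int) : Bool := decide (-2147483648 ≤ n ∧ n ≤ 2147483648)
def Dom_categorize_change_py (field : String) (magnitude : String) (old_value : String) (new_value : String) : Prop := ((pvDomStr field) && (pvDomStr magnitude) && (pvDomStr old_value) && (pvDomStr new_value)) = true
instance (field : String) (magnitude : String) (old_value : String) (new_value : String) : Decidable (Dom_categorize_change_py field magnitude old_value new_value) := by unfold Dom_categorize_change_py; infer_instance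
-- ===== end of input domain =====

-- B: an arithmetic severity score (critical-field flag + magnitude level from a dict) indexed into a label
-- table replaces A's three keyword-tier if/elif chains; the important-field scan is dropped as redundant.
-- ===== PORT A =====
def categorize_change_py (field : String) (magnitude : String) (old_value : String) (new_value : String) : String :=
  let field_lower := PySem.Str.lower field
  let critical_fields := ["subscribers", "views", "videos", "title", "channel_name"]
  if critical_fields.any (fun cf => PySem.Str.isIn cf field_lower) then
    if magnitude == "Major Change" || magnitude == "Infinite" then "Critical"
    else if magnitude == "Moderate Change" then "Important"
    else "Minor"
  else
    let important_fields := ["description", "keywords", "tags", "category"]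
    if important_fields.any (fun f => PySem.Str.isIn f field_lower) then
      if magnitude == "Major Change" || magnitude == "Infinite" then "Important" else "Minor"
    else
      if magnitude == "Major Change" || magnitude == "Infinite" then "Important" else "Minor"

-- ===== PORT B =====
def categorize_change_py_alt (field : String) (magnitude : String) (old_value : String) (new_value : String) : String :=
  let f := PySem.Str.lower field
  let t : Nat :=
    if ["subscribers", "views", "videos", "title", "channel_name"].any
        (fun k => PySem.Str.isIn k f) then 1 else 0
  let m : Nat :=
    PySem.Dict.getD
      (PySem.Dict.mk [("Major Change", (2 : Nat)), ("Infinite", 2), ("Moderate Change", 1)])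
      magnitude 0
  ["Minor", "Minor", "Important", "Critical"].getD (t + m) "Minor"

-- ===== PRECONDITION & SPEC =====
def Spec_categorize_change_py (field : String) (magnitude : String) (old_value : String) (new_value : String) (out : String) : Prop := out = categorize_change_py_alt field magnitude old_value new_value
instance (field : String) (magnitude : String) (old_value : String) (new_value : String) (out : String) : Decidable (Spec_categorize_change_py field magnitude old_value new_value out) := by unfold Spec_categorize_change_py; infer_instance

-- ===== CLAIM =====
def Claim_equal_categorize_change_py : Prop := ∀ (field : String) (magnitude : String) (old_value : String) (new_value : String), Dom_categorize_change_py field magnitude old_value new_value → Spec_categorize_change_py field magnitude old_value new_value (categorize_change_py field magnitude old_value new_value)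

-- ===== LEMMAS AND PROOFS =====

-- ===== VERDICT =====
theorem categorize_change_py_spec : Claim_equal_categorize_change_py := by
  intro field magnitude old_value new_value _
  unfold Spec_categorize_change_py categorize_change_py categorize_change_py_alt
  by_cases h1 : magnitude = "Major Change"
  · subst h1
    simp only [PySem.Dict.getD, PySem.Dict.get?]
    split_ifs <;> simp_all
  · by_cases h2 : magnitude = "Infinite"
    · subst h2
      simp only [PySem.Dict.getD, PySem.Dict.get?]
      split_ifs <;> simp_all
    · by_cases h3 : magnitude = "Moderate Change"
      · subst h3
        simp only [PySem.Dict.getD, PySem.Dict.get?]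
        split_ifs <;> simp_all
      · simp only [PySem.Dict.getD, PySem.Dict.get?,
          beq_eq_false_iff_ne.mpr (Ne.symm h1), beq_eq_false_iff_ne.mpr (Ne.symm h2),
          beq_eq_false_iff_ne.mpr (Ne.symm h3)]
        split_ifs <;>
          simp_all [List.find?_cons, beq_eq_false_iff_ne.mpr (Ne.symm h1),
            beq_eq_false_iff_ne.mpr (Ne.symm h2), beq_eq_false_iff_ne.mpr (Ne.symm h3)]
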